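-- pv_equiv track=rewrite | github.com/Nighteyez07/AdventOfCode2021 | day03.py | filterCO2
-- ===== SOURCE A (Python) =====
-- def filterCO2(array, position):
--     returnArr = []
--     onCnt = 0
--     offCnt = 0
--     keep = ""
--
--     for item in array:
--         if item[position] == "1":
--             onCnt = onCnt + 1
--         else:
--             offCnt = offCnt + 1
--
--     if offCnt <= onCnt:
--         keep = "0"
--     else:
--         keep = "1"
--
--     for item in array:
--         if item[position] == keep:
--             returnArr.append(item)
--
--     return returnArr
-- ===== SOURCE B (Python) =====
-- def filterCO2(array, position):
--     ones = []
--     zeros = []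
--     for item in array:
--         c = item[position]
--         if c == "1":
--             ones.append(item)
--         elif c == "0":
--             zeros.append(item)
--     onCnt = len(ones)
--     offCnt = len(array) - onCnt
--     return zeros if offCnt <= onCnt else ones
-- ===== Notes on version B (the rewrite author's own statement) =====
-- stated objective: alternative
-- what changed: Replaced A's two passes (count bits, then filter by the chosen bit) with a single partitioning pass into ones/zeros buckets followed by an O(1) selection of the bucket to return.
import Mathlib
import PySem

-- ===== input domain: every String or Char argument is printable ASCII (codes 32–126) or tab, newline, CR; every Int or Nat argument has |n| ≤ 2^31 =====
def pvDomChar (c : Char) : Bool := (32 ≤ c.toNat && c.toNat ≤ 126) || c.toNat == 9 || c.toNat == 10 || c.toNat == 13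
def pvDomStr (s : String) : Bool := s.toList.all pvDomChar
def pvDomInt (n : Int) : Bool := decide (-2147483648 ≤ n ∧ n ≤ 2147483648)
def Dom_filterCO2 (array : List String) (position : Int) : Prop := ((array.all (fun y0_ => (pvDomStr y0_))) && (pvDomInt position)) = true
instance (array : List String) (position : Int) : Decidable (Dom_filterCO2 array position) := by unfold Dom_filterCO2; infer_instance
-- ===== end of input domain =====

-- B replaces A's two passes (count, then filter by the chosen bit) with one partitioning
-- pass into ones/zeros buckets plus an O(1) bucket selection (objective: alternative).

-- ===== PORT A =====
-- count pass, then a filter pass keyed by the chosen bit 'keep'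
def filterCO2 (array : List String) (position : Int) : List String :=
  let cnts := array.foldl
    (fun (p : Int × Int) item =>
      if PySem.Str.pyGet? item position = some '1' then (p.1 + 1, p.2) else (p.1, p.2 + 1))
    (0, 0)
  let keep : Char := if cnts.2 ≤ cnts.1 then '0' else '1'
  array.foldl (fun acc item => if PySem.Str.pyGet? item position = some keep then acc ++ [item] else acc) []

-- ===== PORT B =====
-- one partitioning pass, then select the bucket
def filterCO2_alt (array : List String) (position : Int) : List String :=
  let buckets := array.foldl
    (fun (p : List String × List String) item =>
      if PySem.Str.pyGet? item position = some '1' then (p.1 ++ [item], p.2)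
      else if PySem.Str.pyGet? item position = some '0' then (p.1, p.2 ++ [item])
      else p)
    ([], [])
  let onCnt : Int := buckets.1.length
  let offCnt : Int := (array.length : Int) - onCnt
  if offCnt ≤ onCnt then buckets.2 else buckets.1

-- ===== PRECONDITION & SPEC =====
-- Pre_ excludes exactly the inputs where A raises IndexError: position must be a valid
-- Python index into every string of the list.
def Pre_filterCO2 (array : List String) (position : Int) : Prop :=
  ∀ item ∈ array, PySem.Raise.InRange item.toList.length position
instance (array : List String) (position : Int) : Decidable (Pre_filterCO2 array position) := by
  unfold Pre_filterCO2; infer_instance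

def pvWitness_filterCO2 : List String × Int := (["10", "01", "11"], 1)

def Spec_filterCO2 (array : List String) (position : Int) (out : List String) : Prop := out = filterCO2_alt array position
instance (array : List String) (position : Int) (out : List String) : Decidable (Spec_filterCO2 array position out) := by unfold Spec_filterCO2; infer_instance

-- ===== CLAIM (what is proved, stated in full; the proofs are below) =====
def Claim_equal_filterCO2 : Prop := ∀ (array : List String) (position : Int), Dom_filterCO2 array position → Pre_filterCO2 array position → Spec_filterCO2 array position (filterCO2 array position)

-- ===== LEMMAS AND PROOFS =====

-- A's counting loop, characterized generically (q = "bit at position is '1'")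
theorem countFold_eq {alpha : Type} (q : alpha → Prop) [DecidablePred q] (l : List alpha) (a b : Int) :
    l.foldl (fun (p : Int × Int) item => if q item then (p.1 + 1, p.2) else (p.1, p.2 + 1)) (a, b)
    = (a + l.countP (fun x => decide (q x)), b + ((l.length : Int) - l.countP (fun x => decide (q x)))) := by
  induction l generalizing a b with
  | nil => simp
  | cons x xs ih =>
    simp only [List.foldl_cons, List.countP_cons, List.length_cons]
    have hc : xs.countP (fun x => decide (q x)) ≤ xs.length := List.countP_le_length
    by_cases h : q x
    · rw [if_pos h, ih]
      simp only [h, decide_true, Prod.mk.injEq]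
      refine ⟨?_, ?_⟩ <;> push_cast <;> omega
    · rw [if_neg h, ih]
      simp only [h, decide_false, Prod.mk.injEq]
      refine ⟨?_, ?_⟩ <;> push_cast <;> omega

-- B's partitioning loop, characterized generically (q1 / q0 = bit is '1' / '0')
theorem partFold_eq {alpha : Type} (q1 q0 : alpha → Prop) [DecidablePred q1] [DecidablePred q0]
    (l : List alpha) (accL accR : List alpha) :
    l.foldl (fun (p : List alpha × List alpha) item =>
        if q1 item then (p.1 ++ [item], p.2)
        else if q0 item then (p.1, p.2 ++ [item]) else p) (accL, accR)
    = (accL ++ l.filter (fun x => decide (q1 x)), accR ++ l.filter (fun x => decide (¬ q1 x ∧ q0 x))) := by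
  induction l generalizing accL accR with
  | nil => simp
  | cons x xs ih =>
    simp only [List.foldl_cons, List.filter_cons]
    by_cases h1 : q1 x
    · rw [if_pos h1, ih]
      simp [h1]
    · rw [if_neg h1]
      by_cases h0 : q0 x
      · rw [if_pos h0, ih]
        simp [h1, h0]
      · rw [if_neg h0, ih]
        simp [h1, h0]

-- ===== VERDICT (by name: the statement is the Claim_ definition above) =====
theorem filterCO2_spec : Claim_equal_filterCO2 := by
  intro array position _ _
  show filterCO2 array position = filterCO2_alt array position
  simp only [filterCO2, filterCO2_alt,
    countFold_eq (fun item => PySem.Str.pyGet? item position = some '1') array 0 0,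
    partFold_eq (fun item => PySem.Str.pyGet? item position = some '1')
      (fun item => PySem.Str.pyGet? item position = some '0') array [] [],
    List.nil_append, ← List.countP_eq_length_filter]
  set c := array.countP (fun item => decide (PySem.Str.pyGet? item position = some '1')) with hc
  have hle : c ≤ array.length := List.countP_le_length
  by_cases h : (0 : Int) + ((array.length : Int) - (c : Int)) ≤ 0 + (c : Int)
  · have h' : ((array.length : Int) - (c : Int) ≤ (c : Int)) := by omega
    rw [if_pos h, if_pos h', PySem.List.foldl_append_ite_eq_filter]
    refine List.filter_congr ?_
    intro x _
    by_cases h0 : PySem.List.pyGet? x.toList position = some '0' <;> simp [h0]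
  · have h' : ¬ ((array.length : Int) - (c : Int) ≤ (c : Int)) := by omega
    rw [if_neg h, if_neg h', PySem.List.foldl_append_ite_eq_filter]
    simp
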